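-- pv_equiv track=rewrite | github.com/deptz/augment | src/yolo_policy.py | _estimate_loc_delta
-- ===== SOURCE A (Python) =====
-- from typing import Dict, Any, Optional, List
--
-- def _estimate_loc_delta(files: List[Dict[str, Any]]) -> int:
--     """
--     Estimate lines of code delta based on file changes.
--
--     This is a rough estimate. Actual LOC is calculated after APPLY.
--
--     Args:
--         files: List of file change dicts
--
--     Returns:
--         Estimated LOC delta
--     """
--     # Rough estimates per change type
--     estimates = {
--         "create": 50,  # New files typically ~50 LOC
--         "modify": 30,  # Modifications typically ~30 LOC
--         "delete": -20  # Deletions reduce LOC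
--     }
--
--     total = 0
--     for file_change in files:
--         change_type = file_change.get('change', 'modify').lower()
--         estimate = estimates.get(change_type, 30)
--         total += estimate
--
--     return total
-- ===== SOURCE B (Python) =====
-- from typing import Dict, Any, List
--
-- def _estimate_loc_delta(files: List[Dict[str, Any]]) -> int:
--     """Closed-form arithmetic: baseline 30 per file, adjusted by +20 per create and -50 per delete."""
--     creates = sum(1 for f in files if f.get('change', 'modify').lower() == 'create')
--     deletes = sum(1 for f in files if f.get('change', 'modify').lower() == 'delete')
--     return 30 * len(files) + 20 * creates - 50 * deletes
-- ===== Notes on version B (the rewrite author's own statement) =====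
-- stated objective: alternative
-- what changed: B drops A's per-item dictionary lookup and running accumulation entirely: it counts how many files are 'create' and how many are 'delete' (after the same default/lower normalization) and returns the closed form 30*len(files) + 20*creates - 50*deletes, which is correct because every non-create non-delete type (including unknown ones) weighs 30.
import Mathlib
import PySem

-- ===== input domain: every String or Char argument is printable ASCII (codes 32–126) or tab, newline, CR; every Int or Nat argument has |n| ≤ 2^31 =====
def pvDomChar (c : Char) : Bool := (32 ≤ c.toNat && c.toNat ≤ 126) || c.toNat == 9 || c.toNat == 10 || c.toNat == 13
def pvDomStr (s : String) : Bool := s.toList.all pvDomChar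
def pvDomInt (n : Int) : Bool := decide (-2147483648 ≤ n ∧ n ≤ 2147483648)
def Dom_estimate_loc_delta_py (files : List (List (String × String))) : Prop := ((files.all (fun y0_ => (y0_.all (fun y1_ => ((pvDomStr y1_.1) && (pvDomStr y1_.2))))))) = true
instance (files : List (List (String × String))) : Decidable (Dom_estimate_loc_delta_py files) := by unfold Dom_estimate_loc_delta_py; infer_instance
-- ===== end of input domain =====

-- B replaces A's per-item table lookup and running accumulation with the closed form 30*n + 20*#create - 50*#delete; objective: alternative.

-- ===== PORT A =====
-- per-item running total: look up each file's normalized change type in the estimates dict and add its estimate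
def estimate_loc_delta_py (files : List (List (String × String))) : Int :=
  let estimates : PySem.Dict String Int :=
    PySem.Dict.ofList [("create", 50), ("modify", 30), ("delete", -20)]
  files.foldl (fun total file_change =>
    let change_type := PySem.Str.lower ((PySem.Dict.mk file_change).getD "change" "modify")
    let estimate := estimates.getD change_type 30
    total + estimate) 0

-- ===== PORT B =====
-- closed form: count the 'create' and 'delete' files, then 30*len + 20*creates - 50*deletes
def estimate_loc_delta_py_alt (files : List (List (String × String))) : Int :=
  let key := fun (fc : List (String × String)) =>
    PySem.Str.lower ((PySem.Dict.mk fc).getD "change" "modify")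
  let creates : Int := (files.countP (fun fc => key fc == "create") : Nat)
  let deletes : Int := (files.countP (fun fc => key fc == "delete") : Nat)
  30 * (files.length : Int) + 20 * creates - 50 * deletes

-- ===== PRECONDITION & SPEC =====
def Spec_estimate_loc_delta_py (files : List (List (String × String))) (out : Int) : Prop := out = estimate_loc_delta_py_alt files
instance (files : List (List (String × String))) (out : Int) : Decidable (Spec_estimate_loc_delta_py files out) := by unfold Spec_estimate_loc_delta_py; infer_instance

-- ===== CLAIM =====
def Claim_equal_estimate_loc_delta_py : Prop := ∀ (files : List (List (String × String))), Dom_estimate_loc_delta_py files → Spec_estimate_loc_delta_py files (estimate_loc_delta_py files)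

-- ===== LEMMAS AND PROOFS =====

-- proof-only abbreviations: the estimates table and the per-file normalized key
def pvE : PySem.Dict String Int := PySem.Dict.ofList [("create", 50), ("modify", 30), ("delete", -20)]
def pvKey (fc : List (String × String)) : String := PySem.Str.lower ((PySem.Dict.mk fc).getD "change" "modify")

-- per-item weight as a closed form over the two special keys
theorem pv_weight (k : String) :
    pvE.getD k 30 = 30 + 20 * (if k = "create" then (1 : Int) else 0)
      - 50 * (if k = "delete" then (1 : Int) else 0) := by
  by_cases hc : k = "create"
  · subst hc; decide
  · by_cases hd : k = "delete"
    · subst hd; decide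
    · by_cases hm : k = "modify"
      · subst hm; decide
      · have hEq : pvE = PySem.Dict.mk [("create", 50), ("modify", 30), ("delete", -20)] := by decide
        simp [hEq, PySem.Dict.getD_eq_get?_getD, Ne.symm hc, Ne.symm hd, Ne.symm hm,
          PySem.Dict.get?, hc, hd]

-- A's fold with an arbitrary accumulator equals the accumulator plus the closed form
theorem pv_fold (files : List (List (String × String))) (t : Int) :
    files.foldl (fun total fc => total + pvE.getD (pvKey fc) 30) t
      = t + 30 * (files.length : Int)
        + 20 * ((files.countP (fun fc => pvKey fc == "create") : Nat) : Int)
        - 50 * ((files.countP (fun fc => pvKey fc == "delete") : Nat) : Int) := by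
  induction files generalizing t with
  | nil => simp
  | cons fc rest ih =>
    simp only [List.foldl_cons, List.countP_cons, List.length_cons, ih, pv_weight (pvKey fc)]
    by_cases hc : pvKey fc = "create" <;> by_cases hd : pvKey fc = "delete" <;>
      simp [hc, hd] <;> push_cast <;> first | ring | omega

-- ===== VERDICT =====
theorem estimate_loc_delta_py_spec : Claim_equal_estimate_loc_delta_py := by
  intro files _
  show files.foldl (fun total fc => total + pvE.getD (pvKey fc) 30) 0
      = 30 * (files.length : Int)
        + 20 * ((files.countP (fun fc => pvKey fc == "create") : Nat) : Int)
        - 50 * ((files.countP (fun fc => pvKey fc == "delete") : Nat) : Int)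
  rw [pv_fold]; ring
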